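-- pv_equiv track=rewrite | github.com/jaani-builds/daily-widgets-backend | app/services/weather_service.py | _pick_best_geocoding_result
-- ===== SOURCE A (Python) =====
-- def _normalize_location_text(value: str) -> str:
--     return " ".join((value or "").strip().lower().split())
--
-- def _pick_best_geocoding_result(results: list[dict], query: str) -> dict:
--     normalized_query = _normalize_location_text(query)
--     if not results:
--         return {}
--
--     # Prefer exact country-name and city-name matches before fuzzy candidates.
--     for result in results:
--         if _normalize_location_text(result.get("country", "")) == normalized_query:
--             return result
--
--     for result in results:
--         if _normalize_location_text(result.get("name", "")) == normalized_query:
--             return result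
--
--     for result in results:
--         country = _normalize_location_text(result.get("country", ""))
--         name = _normalize_location_text(result.get("name", ""))
--         admin1 = _normalize_location_text(result.get("admin1", ""))
--         if normalized_query in {country, name, admin1}:
--             return result
--
--     return results[0]
-- ===== SOURCE B (Python) =====
-- def _normalize_location_text(value: str) -> str:
--     return " ".join((value or "").strip().lower().split())
--
-- def _pick_best_geocoding_result(results: list[dict], query: str) -> dict:
--     if not results:
--         return {}
--     normalized_query = _normalize_location_text(query)
--     best_rank = 3
--     best = None
--     for result in results:
--         country = _normalize_location_text(result.get("country", ""))
--         name = _normalize_location_text(result.get("name", ""))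
--         admin1 = _normalize_location_text(result.get("admin1", ""))
--         if country == normalized_query:
--             rank = 0
--         elif name == normalized_query:
--             rank = 1
--         elif normalized_query in (country, name, admin1):
--             rank = 2
--         else:
--             rank = 3
--         if rank < best_rank:
--             best_rank = rank
--             best = result
--     return best if best is not None else results[0]
-- ===== Notes on version B (the rewrite author's own statement) =====
-- stated objective: alternative
-- what changed: Replaces A's three sequential scans (one per match tier) by a single pass that assigns each result a priority rank (0 country-exact, 1 name-exact, 2 fuzzy) and keeps the first result of strictly smallest rank.
import Mathlib
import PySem

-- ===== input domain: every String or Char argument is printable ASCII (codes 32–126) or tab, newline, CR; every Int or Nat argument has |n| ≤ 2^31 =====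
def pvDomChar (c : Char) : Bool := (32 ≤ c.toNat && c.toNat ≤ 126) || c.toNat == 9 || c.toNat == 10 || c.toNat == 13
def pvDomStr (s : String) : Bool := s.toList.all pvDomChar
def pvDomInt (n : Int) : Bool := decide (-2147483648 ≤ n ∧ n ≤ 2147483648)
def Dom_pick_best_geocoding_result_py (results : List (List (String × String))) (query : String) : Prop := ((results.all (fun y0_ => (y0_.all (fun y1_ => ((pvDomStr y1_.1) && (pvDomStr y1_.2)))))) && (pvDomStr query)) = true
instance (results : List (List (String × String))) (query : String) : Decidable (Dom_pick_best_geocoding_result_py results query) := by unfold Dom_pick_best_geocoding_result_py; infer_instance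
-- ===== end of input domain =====

-- B replaces A's three sequential scans by one pass keeping the first result of strictly
-- smallest priority rank (0 country-exact, 1 name-exact, 2 fuzzy); return value only.

-- ===== PORT A =====
-- " ".join((value or "").strip().lower().split())
def pvNorm (value : String) : String :=
  PySem.Str.join " " (PySem.Str.split₀ (PySem.Str.lower (PySem.Str.strip (if value = "" then "" else value))))

-- first 'for' loop of A: first result whose normalized country equals the query
def pvLoopCountry (nq : String) : List (List (String × String)) → Option (List (String × String))
  | [] => none
  | r :: rs =>
    if pvNorm (PySem.Dict.getD (PySem.Dict.mk r) "country" "") = nq then some r else pvLoopCountry nq rs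

-- second 'for' loop of A: first result whose normalized name equals the query
def pvLoopName (nq : String) : List (List (String × String)) → Option (List (String × String))
  | [] => none
  | r :: rs =>
    if pvNorm (PySem.Dict.getD (PySem.Dict.mk r) "name" "") = nq then some r else pvLoopName nq rs

-- third 'for' loop of A: set membership in {country, name, admin1}
def pvLoopFuzzy (nq : String) : List (List (String × String)) → Option (List (String × String))
  | [] => none
  | r :: rs =>
    if nq ∈ PySem.Set.ofList [pvNorm (PySem.Dict.getD (PySem.Dict.mk r) "country" ""),
                              pvNorm (PySem.Dict.getD (PySem.Dict.mk r) "name" ""),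
                              pvNorm (PySem.Dict.getD (PySem.Dict.mk r) "admin1" "")]
    then some r else pvLoopFuzzy nq rs

def pick_best_geocoding_result_py (results : List (List (String × String))) (query : String) : List (String × String) :=
  let nq := pvNorm query
  match results with
  | [] => []
  | r0 :: _ =>
    match pvLoopCountry nq results with
    | some r => r
    | none =>
      match pvLoopName nq results with
      | some r => r
      | none =>
        match pvLoopFuzzy nq results with
        | some r => r
        | none => r0

-- ===== PORT B =====
-- B's per-result priority rank: 0 country-exact, 1 name-exact, 2 fuzzy, 3 no match
def pvRank (nq : String) (r : List (String × String)) : Nat :=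
  if pvNorm (PySem.Dict.getD (PySem.Dict.mk r) "country" "") = nq then 0
  else if pvNorm (PySem.Dict.getD (PySem.Dict.mk r) "name" "") = nq then 1
  else if nq = pvNorm (PySem.Dict.getD (PySem.Dict.mk r) "country" "") ∨
            nq = pvNorm (PySem.Dict.getD (PySem.Dict.mk r) "name" "") ∨
            nq = pvNorm (PySem.Dict.getD (PySem.Dict.mk r) "admin1" "") then 2
  else 3

-- B's loop body: 'if rank < best_rank: best_rank, best = rank, result'
def pvStep (nq : String) (st : Nat × Option (List (String × String))) (r : List (String × String)) :
    Nat × Option (List (String × String)) :=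
  if pvRank nq r < st.1 then (pvRank nq r, some r) else st

def pick_best_geocoding_result_py_alt (results : List (List (String × String))) (query : String) : List (String × String) :=
  match results with
  | [] => []
  | r0 :: _ =>
    let final := results.foldl (pvStep (pvNorm query)) (3, none)
    match final.2 with
    | some r => r
    | none => r0

-- ===== PRECONDITION & SPEC =====
def Spec_pick_best_geocoding_result_py (results : List (List (String × String))) (query : String) (out : List (String × String)) : Prop := out = pick_best_geocoding_result_py_alt results query
instance (results : List (List (String × String))) (query : String) (out : List (String × String)) : Decidable (Spec_pick_best_geocoding_result_py results query out) := by unfold Spec_pick_best_geocoding_result_py; infer_instance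

-- ===== CLAIM (what is proved, stated in full; the proofs are below) =====
def Claim_equal_pick_best_geocoding_result_py : Prop := ∀ (results : List (List (String × String))) (query : String), Dom_pick_best_geocoding_result_py results query → Spec_pick_best_geocoding_result_py results query (pick_best_geocoding_result_py results query)

-- ===== LEMMAS AND PROOFS =====

-- left-biased minimum by rank (strict update): the semantics of B's accumulator
def pvMinS (st b : Nat × Option (List (String × String))) : Nat × Option (List (String × String)) :=
  if b.1 < st.1 then b else st

def pvBest (nq : String) (l : List (List (String × String))) : Nat × Option (List (String × String)) :=
  l.foldl (pvStep nq) (3, none)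

lemma pvRank_le (nq : String) (r : List (String × String)) : pvRank nq r ≤ 3 := by
  unfold pvRank; split_ifs <;> omega

lemma pvStep_fst_le (nq : String) (st : Nat × Option (List (String × String)))
    (r : List (String × String)) (h : st.1 ≤ 3) : (pvStep nq st r).1 ≤ 3 := by
  have hr := pvRank_le nq r
  unfold pvStep
  generalize pvRank nq r = k at hr ⊢
  split_ifs <;> simp [h, hr]

lemma pvFold_fst_le (nq : String) (l : List (List (String × String)))
    (st : Nat × Option (List (String × String))) (h : st.1 ≤ 3) :
    (l.foldl (pvStep nq) st).1 ≤ 3 := by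
  induction l generalizing st with
  | nil => exact h
  | cons x l ih => rw [List.foldl_cons]; exact ih _ (pvStep_fst_le nq st x h)

-- B's fold from any admissible accumulator is the left-biased min with the fold from (3, none)
lemma pvFold_min (nq : String) (l : List (List (String × String)))
    (st : Nat × Option (List (String × String))) (h : st.1 ≤ 3) :
    l.foldl (pvStep nq) st = pvMinS st (pvBest nq l) := by
  induction l generalizing st with
  | nil =>
    simp only [List.foldl_nil, pvBest, pvMinS]
    rw [if_neg (by omega)]
  | cons x l ih =>
    rw [List.foldl_cons, ih _ (pvStep_fst_le nq st x h)]
    have hb : pvBest nq (x :: l) = pvMinS (pvStep nq (3, none) x) (pvBest nq l) := by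
      unfold pvBest
      rw [List.foldl_cons, ih _ (pvStep_fst_le nq (3, none) x (by norm_num))]
      rfl
    rw [hb]
    have hB : (pvBest nq l).1 ≤ 3 := pvFold_fst_le nq l _ (by norm_num)
    have hx := pvRank_le nq x
    simp only [pvStep, pvMinS]
    generalize pvRank nq x = k at hx ⊢
    obtain ⟨rb, b⟩ := pvBest nq l
    obtain ⟨s, v⟩ := st
    simp only at hB h ⊢
    split_ifs <;> simp_all <;> omega

-- B's fold computes exactly A's tiered first match
lemma pvBest_char (nq : String) (l : List (List (String × String))) :
    pvBest nq l =
      match pvLoopCountry nq l with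
      | some r => (0, some r)
      | none =>
        match pvLoopName nq l with
        | some r => (1, some r)
        | none =>
          match pvLoopFuzzy nq l with
          | some r => (2, some r)
          | none => (3, none) := by
  induction l with
  | nil => rfl
  | cons x l ih =>
    have hx : pvBest nq (x :: l) = pvMinS (pvStep nq (3, none) x) (pvBest nq l) := by
      unfold pvBest
      rw [List.foldl_cons, pvFold_min nq l _ (pvStep_fst_le nq (3, none) x (by norm_num))]
      rfl
    rw [hx, ih]
    have hmem : (nq ∈ PySem.Set.ofList [pvNorm (PySem.Dict.getD (PySem.Dict.mk x) "country" ""),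
                              pvNorm (PySem.Dict.getD (PySem.Dict.mk x) "name" ""),
                              pvNorm (PySem.Dict.getD (PySem.Dict.mk x) "admin1" "")]) ↔
        (nq = pvNorm (PySem.Dict.getD (PySem.Dict.mk x) "country" "") ∨
         nq = pvNorm (PySem.Dict.getD (PySem.Dict.mk x) "name" "") ∨
         nq = pvNorm (PySem.Dict.getD (PySem.Dict.mk x) "admin1" "")) := by
      rw [PySem.Set.mem_ofList]; simp
    show pvMinS (pvStep nq (3, none) x)
        (match pvLoopCountry nq l with
        | some r => ((0:Nat), some r)
        | none =>
          match pvLoopName nq l with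
          | some r => (1, some r)
          | none =>
            match pvLoopFuzzy nq l with
            | some r => (2, some r)
            | none => (3, none)) = _
    rw [pvLoopCountry, pvLoopName, pvLoopFuzzy]
    simp only [pvStep, pvRank, pvMinS]
    by_cases h0 : pvNorm (PySem.Dict.getD (PySem.Dict.mk x) "country" "") = nq
    · simp only [h0, if_pos]
      rcases pvLoopCountry nq l with _ | r <;> rcases pvLoopName nq l with _ | r2 <;>
        rcases pvLoopFuzzy nq l with _ | r3 <;> simp
    · by_cases h1 : pvNorm (PySem.Dict.getD (PySem.Dict.mk x) "name" "") = nq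
      · simp only [h0, h1, if_false, if_pos]
        rcases pvLoopCountry nq l with _ | r <;> rcases pvLoopName nq l with _ | r2 <;>
          rcases pvLoopFuzzy nq l with _ | r3 <;> simp
      · by_cases h2 : nq = pvNorm (PySem.Dict.getD (PySem.Dict.mk x) "country" "") ∨
            nq = pvNorm (PySem.Dict.getD (PySem.Dict.mk x) "name" "") ∨
            nq = pvNorm (PySem.Dict.getD (PySem.Dict.mk x) "admin1" "")
        · simp only [h0, h1, h2, hmem, if_false, if_true]
          rcases pvLoopCountry nq l with _ | r <;> rcases pvLoopName nq l with _ | r2 <;>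
            rcases pvLoopFuzzy nq l with _ | r3 <;> simp
        · simp only [h0, h1, h2, hmem, if_false]
          rcases pvLoopCountry nq l with _ | r <;> rcases pvLoopName nq l with _ | r2 <;>
            rcases pvLoopFuzzy nq l with _ | r3 <;> simp

-- ===== VERDICT (by name: the statement is the Claim_ definition above) =====
theorem pick_best_geocoding_result_py_spec : Claim_equal_pick_best_geocoding_result_py := by
  intro results query _
  unfold Spec_pick_best_geocoding_result_py
  unfold pick_best_geocoding_result_py pick_best_geocoding_result_py_alt
  cases results with
  | nil => rfl
  | cons r0 rs =>
    simp only
    rw [show (r0 :: rs).foldl (pvStep (pvNorm query)) (3, none) = pvBest (pvNorm query) (r0 :: rs) from rfl]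
    rw [pvBest_char]
    rcases pvLoopCountry (pvNorm query) (r0 :: rs) with _ | r <;>
      rcases pvLoopName (pvNorm query) (r0 :: rs) with _ | r2 <;>
      rcases pvLoopFuzzy (pvNorm query) (r0 :: rs) with _ | r3 <;> simp
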